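-- pv_equiv track=rewrite | github.com/bvandenabbeele/AdventOfCode | 2023/day_02/main.py | part_1
-- ===== SOURCE A (Python) =====
-- def part_1(data, red, green, blue):
--     colors = ("red", "green", "blue")
--     counts = (red, green, blue)
--
--     total = 0
--     for id, hands in data.items():
--         possible = True
--
--         i = 0
--         while possible and (i < len(hands)):
--             hand = hands[i]
--
--             j = 0
--             while possible and (j < 3):
--                 try:
--                     possible = hand[colors[j]] <= counts[j]
--
--                 except KeyError:
--                     pass
--
--                 finally:
--                     j += 1
--
--             i += 1
--
--         if possible:
--             total += id
--
--     return total
-- ===== SOURCE B (Python) =====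
-- def part_1(data, red, green, blue):
--     limits = {"red": red, "green": green, "blue": blue}
--     total = 0
--     for id, hands in data.items():
--         possible = True
--         for color, limit in limits.items():
--             if max((hand[color] for hand in hands if color in hand), default=limit) > limit:
--                 possible = False
--         if possible:
--             total += id
--     return total
-- ===== Notes on version B (the rewrite author's own statement) =====
-- stated objective: simpler
-- what changed: Replaces the flag-driven nested while loops with try/except KeyError by a per-color pass that takes the maximum count seen across all hands (colors never drawn impose no constraint via the default) and compares it once against the limit.
import Mathlib
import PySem

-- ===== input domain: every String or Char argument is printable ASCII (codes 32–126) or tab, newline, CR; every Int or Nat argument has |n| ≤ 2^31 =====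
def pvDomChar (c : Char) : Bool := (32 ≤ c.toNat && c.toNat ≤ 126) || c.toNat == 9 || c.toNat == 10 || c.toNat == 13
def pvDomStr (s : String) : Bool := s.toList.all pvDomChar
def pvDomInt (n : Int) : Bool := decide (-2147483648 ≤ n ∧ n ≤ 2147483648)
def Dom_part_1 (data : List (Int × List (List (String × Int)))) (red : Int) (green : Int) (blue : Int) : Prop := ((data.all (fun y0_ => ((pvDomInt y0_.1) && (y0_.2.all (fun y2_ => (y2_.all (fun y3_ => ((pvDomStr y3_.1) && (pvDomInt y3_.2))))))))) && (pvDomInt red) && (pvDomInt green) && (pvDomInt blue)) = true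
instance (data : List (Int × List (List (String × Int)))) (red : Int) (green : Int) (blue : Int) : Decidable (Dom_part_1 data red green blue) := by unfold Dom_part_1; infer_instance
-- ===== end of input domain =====

-- B replaces A's flag-driven nested while loops (try/except KeyError) by a per-color
-- maximum over all hands compared once against the limit; same asymptotic cost (simpler).

-- ===== PORT A =====
-- inner 'while possible and (j < 3)' loop: walks the (color, count) pairs with the flag;
-- 'hand[colors[j]]' with 'except KeyError: pass' is the none-branch keeping 'possible'.
def pvInnerA (hand : List (String × Int)) (pairs : List (String × Int)) (possible : Bool) : Bool :=
  match pairs with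
  | [] => possible
  | (c, cnt) :: rest =>
    if possible then
      pvInnerA hand rest
        (match (PySem.Dict.mk hand).get? c with
         | some v => decide (v ≤ cnt)
         | none => possible)
    else possible

-- outer 'while possible and (i < len(hands))' loop
def pvOuterA (pairs : List (String × Int)) (hands : List (List (String × Int))) (possible : Bool) : Bool :=
  match hands with
  | [] => possible
  | h :: rest =>
    if possible then pvOuterA pairs rest (pvInnerA h pairs possible) else possible

def part_1 (data : List (Int × List (List (String × Int)))) (red : Int) (green : Int) (blue : Int) : Int :=
  data.foldl
    (fun total p =>
      if pvOuterA [("red", red), ("green", green), ("blue", blue)] p.2 true then total + p.1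
      else total)
    0

-- ===== PORT B =====
-- 'for color, limit in limits.items(): if max((hand[color] for hand in hands if color in hand), default=limit) > limit: possible = False'
def pvPossibleB (hands : List (List (String × Int))) (limits : PySem.Dict String Int) : Bool :=
  limits.items.foldl
    (fun possible cl =>
      if PySem.List.maxD (hands.filterMap (fun h => (PySem.Dict.mk h).get? cl.1)) (fun v => v) cl.2 > cl.2
      then false else possible)
    true

def part_1_alt (data : List (Int × List (List (String × Int)))) (red : Int) (green : Int) (blue : Int) : Int :=
  let limits : PySem.Dict String Int := PySem.Dict.mk [("red", red), ("green", green), ("blue", blue)]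
  data.foldl (fun total p => if pvPossibleB p.2 limits then total + p.1 else total) 0

-- ===== PRECONDITION & SPEC =====
def Spec_part_1 (data : List (Int × List (List (String × Int)))) (red : Int) (green : Int) (blue : Int) (out : Int) : Prop := out = part_1_alt data red green blue
instance (data : List (Int × List (List (String × Int)))) (red : Int) (green : Int) (blue : Int) (out : Int) : Decidable (Spec_part_1 data red green blue out) := by unfold Spec_part_1; infer_instance

-- ===== CLAIM (what is proved, stated in full; the proofs are below) =====
def Claim_equal_part_1 : Prop := ∀ (data : List (Int × List (List (String × Int)))) (red : Int) (green : Int) (blue : Int), Dom_part_1 data red green blue → Spec_part_1 data red green blue (part_1 data red green blue)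

-- ===== LEMMAS AND PROOFS =====

-- the per-(color, limit) check a single hand must pass
def pvCheck (hand : List (String × Int)) (cl : String × Int) : Bool :=
  match (PySem.Dict.mk hand).get? cl.1 with
  | some v => decide (v ≤ cl.2)
  | none => true

theorem pvInnerA_false (hand : List (String × Int)) (pairs : List (String × Int)) :
    pvInnerA hand pairs false = false := by
  cases pairs with
  | nil => rfl
  | cons p rest => cases p; simp [pvInnerA]

theorem pvInnerA_true (hand : List (String × Int)) (pairs : List (String × Int)) :
    pvInnerA hand pairs true = pairs.all (pvCheck hand) := by
  induction pairs with
  | nil => rfl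
  | cons p rest ih =>
    obtain ⟨c, cnt⟩ := p
    simp only [pvInnerA, if_pos, List.all_cons, pvCheck]
    cases hg : (PySem.Dict.mk hand).get? c with
    | none => simp [ih]
    | some v =>
      by_cases hv : v ≤ cnt
      · simp [hv, ih]
      · simp [hv, pvInnerA_false]

theorem pvOuterA_eq (pairs : List (String × Int)) (hands : List (List (String × Int))) (b : Bool) :
    pvOuterA pairs hands b = (b && hands.all (fun h => pvInnerA h pairs true)) := by
  induction hands generalizing b with
  | nil => cases b <;> rfl
  | cons h rest ih =>
    cases b with
    | false => rfl
    | true =>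
      simp only [pvOuterA, if_true, List.all_cons, Bool.true_and]
      cases hh : pvInnerA h pairs true <;> rw [ih]

theorem pvPossibleB_eq (hands : List (List (String × Int))) (cc : List (String × Int)) :
    pvPossibleB hands (PySem.Dict.mk cc)
      = cc.all (fun cl =>
          decide (PySem.List.maxD (hands.filterMap (fun h => (PySem.Dict.mk h).get? cl.1)) (fun v => v) cl.2 ≤ cl.2)) := by
  have key : ∀ (l : List (String × Int)) (b : Bool),
      l.foldl (fun possible cl =>
        if PySem.List.maxD (hands.filterMap (fun h => (PySem.Dict.mk h).get? cl.1)) (fun v => v) cl.2 > cl.2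
        then false else possible) b
      = (b && l.all (fun cl =>
          decide (PySem.List.maxD (hands.filterMap (fun h => (PySem.Dict.mk h).get? cl.1)) (fun v => v) cl.2 ≤ cl.2))) := by
    intro l
    induction l with
    | nil => intro b; simp
    | cons cl rest ih =>
      intro b
      simp only [List.foldl_cons, List.all_cons, ih]
      by_cases hm : PySem.List.maxD (hands.filterMap (fun h => (PySem.Dict.mk h).get? cl.1)) (fun v => v) cl.2 > cl.2
      · simp [hm, not_le.mpr hm]
      · simp [hm, not_lt.mp hm]
  simpa [pvPossibleB] using key cc true

-- the maximum-vs-limit test of B equals "every hand passes the check" of A, per color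
theorem pvMax_eq_all (hands : List (List (String × Int))) (cl : String × Int) :
    decide (PySem.List.maxD (hands.filterMap (fun h => (PySem.Dict.mk h).get? cl.1)) (fun v => v) cl.2 ≤ cl.2)
      = hands.all (fun h => pvCheck h cl) := by
  rw [Bool.eq_iff_iff]
  simp only [decide_eq_true_eq, List.all_eq_true]
  constructor
  · intro hmax h hh
    unfold pvCheck
    cases hg : (PySem.Dict.mk h).get? cl.1 with
    | none => rfl
    | some v =>
      simp only [decide_eq_true_eq]
      have hv : v ∈ hands.filterMap (fun h => (PySem.Dict.mk h).get? cl.1) := by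
        exact List.mem_filterMap.mpr ⟨h, hh, hg⟩
      unfold PySem.List.maxD at hmax
      cases hm : PySem.List.max? (hands.filterMap (fun h => (PySem.Dict.mk h).get? cl.1)) (fun v => v) with
      | none =>
        exact absurd hv (by simp [(PySem.List.max?_eq_none_iff _ _).mp hm])
      | some m =>
        have := PySem.List.max?_isMax hm v hv
        rw [hm] at hmax
        simp only [Option.getD_some] at hmax
        exact le_trans this hmax
  · intro hall
    unfold PySem.List.maxD
    cases hm : PySem.List.max? (hands.filterMap (fun h => (PySem.Dict.mk h).get? cl.1)) (fun v => v) with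
    | none => simp
    | some m =>
      simp only [Option.getD_some]
      have hmem := PySem.List.max?_mem hm
      obtain ⟨h, hh, hg⟩ := List.mem_filterMap.mp hmem
      have := hall h hh
      unfold pvCheck at this
      rw [hg] at this
      simpa using this

-- the two quantifier orders agree
theorem pvSwap (hands : List (List (String × Int))) (cc : List (String × Int)) :
    hands.all (fun h => cc.all (pvCheck h)) = cc.all (fun cl => hands.all (fun h => pvCheck h cl)) := by
  rw [Bool.eq_iff_iff]
  simp only [List.all_eq_true]
  exact ⟨fun H cl hcl h hh => H h hh cl hcl, fun H h hh cl hcl => H cl hcl h hh⟩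

theorem pvGame_eq (red green blue : Int) (hands : List (List (String × Int))) :
    pvOuterA [("red", red), ("green", green), ("blue", blue)] hands true
      = pvPossibleB hands (PySem.Dict.mk [("red", red), ("green", green), ("blue", blue)]) := by
  rw [pvOuterA_eq, pvPossibleB_eq, Bool.true_and]
  calc hands.all (fun h => pvInnerA h [("red", red), ("green", green), ("blue", blue)] true)
      = hands.all (fun h => [("red", red), ("green", green), ("blue", blue)].all (pvCheck h)) := by
        simp only [pvInnerA_true]
    _ = _ := by
        rw [pvSwap]
        simp only [pvMax_eq_all]

-- ===== VERDICT (by name: the statement is the Claim_ definition above) =====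
theorem part_1_spec : Claim_equal_part_1 := by
  intro data red green blue _
  unfold Spec_part_1 part_1 part_1_alt
  simp only [pvGame_eq]
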